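-- pv_equiv track=rewrite | github.com/diegomendieta/projects | Machine Learning/Elections Clustering/Clustering.py | belongs_to_cluster
-- ===== SOURCE A (Python) =====
-- def belongs_to_cluster(assignments):
--     cls = {}
--     for p in assignments:
--         c = assignments[p]
--         try:
--             cls[c].append(p)
--         except KeyError:
--             cls[c] = []
--             cls[c].append(p)
--     return cls
-- ===== SOURCE B (Python) =====
-- def belongs_to_cluster(assignments):
--     order = list(dict.fromkeys(assignments.values()))
--     return {c: [p for p, c2 in assignments.items() if c2 == c] for c in order}
-- ===== Notes on version B (the rewrite author's own statement) =====
-- stated objective: alternative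
-- what changed: Instead of a single pass that grows per-cluster lists inside a dict, B first computes the ordered list of distinct cluster values (dict.fromkeys) and then builds each cluster's member list by a comprehension filtering the assignments, trading O(n) for O(n*k).
import Mathlib
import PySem

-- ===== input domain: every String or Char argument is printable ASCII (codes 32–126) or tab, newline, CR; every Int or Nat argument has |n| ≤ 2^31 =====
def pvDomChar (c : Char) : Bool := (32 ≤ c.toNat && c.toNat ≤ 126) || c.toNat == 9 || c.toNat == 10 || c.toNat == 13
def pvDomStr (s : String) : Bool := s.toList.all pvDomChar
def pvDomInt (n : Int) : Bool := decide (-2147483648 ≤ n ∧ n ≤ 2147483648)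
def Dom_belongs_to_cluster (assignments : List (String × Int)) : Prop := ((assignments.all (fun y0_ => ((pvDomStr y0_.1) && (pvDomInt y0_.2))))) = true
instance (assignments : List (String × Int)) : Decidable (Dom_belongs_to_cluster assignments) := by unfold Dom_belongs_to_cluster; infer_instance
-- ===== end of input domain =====

-- B groups by first collecting the distinct cluster values in order and then filtering the
-- assignments once per cluster, instead of A's single pass growing lists inside a dict
-- (an alternative decomposition, not faster).


-- ===== PORT A =====
-- for p in assignments: c = assignments[p]; try cls[c].append(p) except KeyError: cls[c] = []; cls[c].append(p)
def belongs_to_cluster (assignments : List (String × Int)) : List (Int × List String) :=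
  ((PySem.Dict.mk assignments).keys.foldl
    (fun (cls : PySem.Dict Int (List String)) p =>
      match (PySem.Dict.mk assignments).get? p with
      | some c =>
        match cls.get? c with
        | some l => cls.insert c (l ++ [p])                -- cls[c].append(p)
        | none   => (cls.insert c []).insert c ([] ++ [p]) -- except KeyError: cls[c] = []; cls[c].append(p)
      | none => cls)  -- unreachable: p is iterated from the dict's own keys
    PySem.Dict.empty).items

-- ===== PORT B =====
-- order = list(dict.fromkeys(assignments.values()))
-- return {c: [p for p, c2 in assignments.items() if c2 == c] for c in order}
def belongs_to_cluster_alt (assignments : List (String × Int)) : List (Int × List String) :=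
  let order := PySem.List.dedup (assignments.map (fun pc => pc.2))
  order.map (fun c => (c, (assignments.filter (fun pc => pc.2 == c)).map (fun pc => pc.1)))

-- ===== PRECONDITION & SPEC =====
-- The parameter is a Python dict: its association list has pairwise-distinct keys.
def Pre_belongs_to_cluster (assignments : List (String × Int)) : Prop :=
  (assignments.map (fun pc => pc.1)).Nodup
instance (assignments : List (String × Int)) : Decidable (Pre_belongs_to_cluster assignments) := by
  unfold Pre_belongs_to_cluster; infer_instance

def pvWitness_belongs_to_cluster : (List (String × Int)) := [("a", 1), ("b", 2), ("c", 1)]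

def Spec_belongs_to_cluster (assignments : List (String × Int)) (out : List (Int × List String)) : Prop := out = belongs_to_cluster_alt assignments
instance (assignments : List (String × Int)) (out : List (Int × List String)) : Decidable (Spec_belongs_to_cluster assignments out) := by unfold Spec_belongs_to_cluster; infer_instance

-- ===== CLAIM (what is proved, stated in full; the proofs are below) =====
def Claim_equal_belongs_to_cluster : Prop := ∀ (assignments : List (String × Int)), Dom_belongs_to_cluster assignments → Pre_belongs_to_cluster assignments → Spec_belongs_to_cluster assignments (belongs_to_cluster assignments)

-- ===== LEMMAS AND PROOFS =====

-- A's loop body, with the (always-successful) key lookup resolved, is exactly a dict `modify`.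
lemma step_eq_modify (cls : PySem.Dict Int (List String)) (c : Int) (p : String) :
    (match cls.get? c with
     | some l => cls.insert c (l ++ [p])
     | none   => (cls.insert c []).insert c ([] ++ [p]))
      = cls.modify c [] (fun x => x ++ [p]) := by
  have hm : cls.modify c [] (fun x => x ++ [p]) = cls.insert c (cls.getD c [] ++ [p]) := rfl
  cases h : cls.get? c with
  | some l =>
      rw [hm, PySem.Dict.getD_eq_get?_getD, h]; rfl
  | none =>
      rw [hm, PySem.Dict.getD_eq_get?_getD, h, PySem.Dict.insert_insert_self]; rfl

theorem main_equiv (assignments : List (String × Int))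
    (hnd : (assignments.map (fun pc => pc.1)).Nodup) :
    belongs_to_cluster assignments = belongs_to_cluster_alt assignments := by
  have hkeys : (PySem.Dict.mk assignments).keys = assignments.map (fun pc => pc.1) := rfl
  have hitems : (PySem.Dict.mk assignments).items = assignments := rfl
  -- 1. fold over keys with lookup = fold over pairs using the pair's own value
  have h1 : belongs_to_cluster assignments
      = (assignments.foldl
          (fun (cls : PySem.Dict Int (List String)) pc =>
            cls.modify pc.2 [] (fun x => x ++ [pc.1])) PySem.Dict.empty).items := by
    unfold belongs_to_cluster
    rw [hkeys, List.foldl_map]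
    congr 1
    apply PySem.List.foldl_congr_mem
    intro cls pc hmem
    have hget : (PySem.Dict.mk assignments).get? pc.1 = some pc.2 := by
      apply PySem.Dict.get?_of_mem_items
      · rw [hitems]; exact hmem
      · rw [hkeys]; exact hnd
    rw [hget]
    exact step_eq_modify cls pc.2 pc.1
  -- 2. re-index the fold by the swapped pairs so the library grouping lemmas apply
  set M := assignments.map (fun pc => (pc.2, pc.1)) with hM
  have h2 : (assignments.foldl
          (fun (cls : PySem.Dict Int (List String)) pc =>
            cls.modify pc.2 [] (fun x => x ++ [pc.1])) PySem.Dict.empty)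
      = M.foldl (fun d p => d.modify p.1 [] (fun x => x ++ [p.2])) PySem.Dict.empty := by
    rw [hM, List.foldl_map]
  rw [h1, h2]
  -- 3. keys of the grouping fold: distinct cluster values, in first-appearance order
  have hnodup : (M.foldl (fun d p => d.modify p.1 [] (fun x => x ++ [p.2])) PySem.Dict.empty).keys.Nodup := by
    exact PySem.Dict.nodup_keys_foldl_modify_key M (fun p => p.1) [] (fun d x v => v ++ [x.2]) PySem.Dict.empty (by simp [PySem.Dict.keys_empty])
  have hk : (M.foldl (fun d p => d.modify p.1 [] (fun x => x ++ [p.2])) PySem.Dict.empty).keys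
      = PySem.Set.ofList (assignments.map (fun pc => pc.2)) := by
    rw [PySem.Dict.keys_foldl_modify_key M (fun p => p.1) [] (fun d x v => v ++ [x.2]) PySem.Dict.empty]
    show PySem.Set.update [] (M.map (fun p => p.1)) = _
    rw [hM, List.map_map]
    rfl
  rw [PySem.Dict.items_eq_map_keys _ hnodup [], hk]
  -- 4. each entry's value is the filtered member list
  unfold belongs_to_cluster_alt
  rw [PySem.List.dedup_eq_ofList]
  apply List.map_congr_left
  intro c hc
  rw [PySem.Dict.getD_foldl_modify_append M PySem.Dict.empty c]
  simp [hM, List.filter_map, Function.comp_def]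

-- ===== VERDICT (by name: the statement is the Claim_ definition above) =====
theorem belongs_to_cluster_spec : Claim_equal_belongs_to_cluster := by
  intro assignments _ hpre
  unfold Spec_belongs_to_cluster
  exact main_equiv assignments hpre
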